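-- pv_equiv track=rewrite | github.com/besasam/advent-of-code | 2023/12/12.py | trim_right
-- ===== SOURCE A (Python) =====
-- def trim_right(record, constraints):
--     if not constraints:
--         return record, constraints[:]
--     c = constraints[-1]
--     groups = record.split('.')
--     if len(groups[-1]) <= c:
--         return trim_right('.'.join(groups[:-1]), constraints[:-1])
--     return record, constraints[:]
-- ===== SOURCE B (Python) =====
-- def trim_right(record, constraints):
--     groups = record.split('.')
--     while constraints and len(groups[-1]) <= constraints[-1]:
--         groups = groups[:-1] or ['']
--         constraints = constraints[:-1]
--     return '.'.join(groups), constraints[:]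
-- ===== Notes on version B (the rewrite author's own statement) =====
-- stated objective: alternative
-- what changed: A recursively re-joins and re-splits the record string on every trim step; B splits the record once, peels matching (group, constraint) pairs off the ends of the two lists in one loop, and joins once at the end.
import Mathlib
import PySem

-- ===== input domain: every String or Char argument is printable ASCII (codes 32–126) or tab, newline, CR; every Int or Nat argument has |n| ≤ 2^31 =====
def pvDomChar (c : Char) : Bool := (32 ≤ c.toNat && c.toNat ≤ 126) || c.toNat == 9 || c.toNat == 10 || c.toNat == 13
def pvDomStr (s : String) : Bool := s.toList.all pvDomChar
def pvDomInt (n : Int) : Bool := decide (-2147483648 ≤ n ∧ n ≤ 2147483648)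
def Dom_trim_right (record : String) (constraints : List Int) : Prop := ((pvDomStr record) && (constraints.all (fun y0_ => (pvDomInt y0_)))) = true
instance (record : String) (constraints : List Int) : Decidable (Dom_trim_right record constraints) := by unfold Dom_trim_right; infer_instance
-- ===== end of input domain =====

-- B replaces A's recursion (which re-joins and re-splits the record every step) by splitting
-- once and peeling groups and constraints off the ends of two lists in a single loop.

-- shared primitive port of record.split('.') (exact: sep is the literal non-empty ".")
def strSplitDot (s : String) : List String :=
  (PySem.Chars.splitOn s.toList ['.']).map String.ofList

-- ===== PORT A =====
def trim_right (record : String) (constraints : List Int) : String × List Int :=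
  if h : constraints = [] then
    (record, constraints)
  else
    let c := PySem.List.pyGetD constraints (-1) 0
    let groups := strSplitDot record
    if PySem.Str.len (PySem.List.pyGetD groups (-1) "") ≤ c then
      trim_right (PySem.Str.join "." (PySem.List.slice groups none (some (-1))))
                 (PySem.List.slice constraints none (some (-1)))
    else
      (record, constraints)
termination_by constraints.length
decreasing_by
  rw [PySem.List.slice_to_neg_one]
  have : constraints.length ≠ 0 := fun hl => h (List.eq_nil_of_length_eq_zero hl)
  simp [List.length_dropLast]; omega

-- ===== PORT B =====
def trimAltLoop (groups : List String) (cons : List Int) : List String × List Int :=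
  if h : cons ≠ [] ∧ PySem.Str.len (PySem.List.pyGetD groups (-1) "") ≤ PySem.List.pyGetD cons (-1) 0 then
    trimAltLoop
      (let g := PySem.List.slice groups none (some (-1)); if g = [] then [""] else g)
      (PySem.List.slice cons none (some (-1)))
  else
    (groups, cons)
termination_by cons.length
decreasing_by
  rw [PySem.List.slice_to_neg_one]
  have : cons.length ≠ 0 := fun hl => h.1 (List.eq_nil_of_length_eq_zero hl)
  simp [List.length_dropLast]; omega

def trim_right_alt (record : String) (constraints : List Int) : String × List Int :=
  let r := trimAltLoop (strSplitDot record) constraints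
  (PySem.Str.join "." r.1, r.2)

-- ===== PRECONDITION & SPEC =====
def Spec_trim_right (record : String) (constraints : List Int) (out : String × List Int) : Prop := out = trim_right_alt record constraints
instance (record : String) (constraints : List Int) (out : String × List Int) : Decidable (Spec_trim_right record constraints out) := by unfold Spec_trim_right; infer_instance

-- ===== CLAIM (what is proved, stated in full; the proofs are below) =====
def Claim_equal_trim_right : Prop := ∀ (record : String) (constraints : List Int), Dom_trim_right record constraints → Spec_trim_right record constraints (trim_right record constraints)

-- ===== LEMMAS AND PROOFS =====

-- prepend p onto the head group (the shape splitOn's accumulator produces)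
def hpGrp (p : List Char) : List (List Char) → List (List Char)
  | [] => [p]
  | g :: gs => (p ++ g) :: gs

-- direct structural recursion computing split-on-'.'
def fsplit : List Char → List (List Char)
  | [] => [[]]
  | c :: rest => if c = '.' then [] :: fsplit rest else hpGrp [c] (fsplit rest)

theorem fsplit_ne_nil (l : List Char) : fsplit l ≠ [] := by
  cases l with
  | nil => simp [fsplit]
  | cons c rest =>
    simp only [fsplit]
    split
    · simp
    · cases h : fsplit rest <;> simp [hpGrp]

theorem hpGrp_append (a b : List Char) (xs : List (List Char)) :
    hpGrp (a ++ b) xs = hpGrp a (hpGrp b xs) := by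
  cases xs <;> simp [hpGrp]

theorem hpGrp_nil (xs : List (List Char)) (h : xs ≠ []) : hpGrp [] xs = xs := by
  cases xs <;> simp_all [hpGrp]

theorem splitOn_go_eq (fuel : Nat) :
    ∀ (l cur : List Char) (acc : List (List Char)), l.length ≤ fuel →
      PySem.Chars.splitOn.go ['.'] fuel l cur acc =
        acc.reverse ++ hpGrp cur.reverse (fsplit l) := by
  induction fuel with
  | zero =>
    intro l cur acc hl
    have : l = [] := List.eq_nil_of_length_eq_zero (Nat.le_zero.mp hl)
    subst this
    simp [PySem.Chars.splitOn.go, fsplit, hpGrp]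
  | succ n ih =>
    intro l cur acc hl
    cases l with
    | nil => simp [PySem.Chars.splitOn.go, fsplit, hpGrp]
    | cons c rest =>
      by_cases hc : c = '.'
      · subst hc
        have hpre : List.isPrefixOf ['.'] ('.' :: rest) = true := by
          simp [List.isPrefixOf]
        rw [PySem.Chars.splitOn.go]
        simp only [hpre, if_pos]
        have hdr : List.drop (['.'] : List Char).length ('.' :: rest) = rest := by simp
        rw [hdr, ih rest [] _ (by simpa using Nat.le_of_succ_le_succ hl)]
        have h1 : (([] : List Char)).reverse = [] := rfl
        rw [h1, hpGrp_nil _ (fsplit_ne_nil rest)]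
        simp [fsplit, hpGrp]
      · have hpre : List.isPrefixOf ['.'] (c :: rest) = false := by
          simp [List.isPrefixOf]
          exact fun h => hc h.symm
        rw [PySem.Chars.splitOn.go]
        simp only [hpre]
        rw [if_neg (by simp)]
        rw [ih rest (c :: cur) acc (by simpa using Nat.le_of_succ_le_succ hl)]
        simp only [fsplit, if_neg hc, List.reverse_cons]
        rw [hpGrp_append]

theorem splitOn_eq_fsplit (l : List Char) :
    PySem.Chars.splitOn l ['.'] = fsplit l := by
  unfold PySem.Chars.splitOn
  rw [splitOn_go_eq (l.length + 1) l [] [] (by omega)]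
  simp [hpGrp_nil _ (fsplit_ne_nil l)]

theorem mem_fsplit_dotfree (l : List Char) : ∀ g ∈ fsplit l, '.' ∉ g := by
  induction l with
  | nil => simp [fsplit]
  | cons c rest ih =>
    intro g hg
    by_cases hc : c = '.'
    · subst hc
      simp only [fsplit] at hg
      rcases List.mem_cons.mp hg with rfl | hg
      · simp
      · exact ih g hg
    · simp only [fsplit, if_neg hc] at hg
      cases hfs : fsplit rest with
      | nil => exact absurd hfs (fsplit_ne_nil rest)
      | cons g0 gs =>
        rw [hfs] at hg
        simp only [hpGrp] at hg
        rcases List.mem_cons.mp hg with rfl | hg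
        · intro hmem
          rcases List.mem_append.mp hmem with h | h
          · simp at h; exact hc h.symm
          · exact ih g0 (hfs ▸ List.mem_cons_self ..) h
        · exact ih g (hfs ▸ List.mem_cons_of_mem _ hg)

theorem join_cons_of_ne_nil (c : Char) (g : List Char) (gs : List (List Char)) :
    PySem.Chars.join ['.'] ((c :: g) :: gs) = c :: PySem.Chars.join ['.'] (g :: gs) := by
  cases gs with
  | nil => simp [PySem.Chars.join_singleton]
  | cons g' gs' => rw [PySem.Chars.join_cons_cons, PySem.Chars.join_cons_cons]; simp

theorem join_fsplit (l : List Char) : PySem.Chars.join ['.'] (fsplit l) = l := by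
  induction l with
  | nil => simp [fsplit, PySem.Chars.join_singleton]
  | cons c rest ih =>
    simp only [fsplit]
    by_cases hc : c = '.'
    · subst hc
      rw [if_pos rfl]
      cases hfs : fsplit rest with
      | nil => exact absurd hfs (fsplit_ne_nil rest)
      | cons g gs =>
        rw [PySem.Chars.join_cons_cons]
        rw [hfs] at ih
        simp [ih]
    · rw [if_neg hc]
      cases hfs : fsplit rest with
      | nil => exact absurd hfs (fsplit_ne_nil rest)
      | cons g gs =>
        show PySem.Chars.join ['.'] (hpGrp [c] (g :: gs)) = c :: rest
        simp only [hpGrp, List.singleton_append]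
        rw [join_cons_of_ne_nil]
        rw [hfs] at ih
        rw [ih]

theorem fsplit_dotfree (g : List Char) (h : '.' ∉ g) : fsplit g = [g] := by
  induction g with
  | nil => simp [fsplit]
  | cons c rest ih =>
    have hc : c ≠ '.' := fun hc => h (hc ▸ List.mem_cons_self ..)
    simp only [fsplit, if_neg hc]
    rw [ih (fun hm => h (List.mem_cons_of_mem _ hm))]
    simp [hpGrp]

theorem fsplit_append_dot (g t : List Char) (h : '.' ∉ g) :
    fsplit (g ++ '.' :: t) = g :: fsplit t := by
  induction g with
  | nil => simp [fsplit]
  | cons c rest ih =>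
    have hc : c ≠ '.' := fun hc => h (hc ▸ List.mem_cons_self ..)
    simp only [List.cons_append, fsplit, if_neg hc]
    rw [ih (fun hm => h (List.mem_cons_of_mem _ hm))]
    simp [hpGrp]

theorem fsplit_join (gs : List (List Char)) (hne : gs ≠ [])
    (hdf : ∀ g ∈ gs, '.' ∉ g) : fsplit (PySem.Chars.join ['.'] gs) = gs := by
  induction gs with
  | nil => exact absurd rfl hne
  | cons g gs' ih =>
    cases gs' with
    | nil =>
      rw [PySem.Chars.join_singleton]
      exact fsplit_dotfree g (hdf g (List.mem_cons_self ..))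
    | cons g2 gs'' =>
      rw [PySem.Chars.join_cons_cons]
      have : g ++ ['.'] ++ PySem.Chars.join ['.'] (g2 :: gs'') =
          g ++ '.' :: PySem.Chars.join ['.'] (g2 :: gs'') := by simp
      rw [this, fsplit_append_dot g _ (hdf g (List.mem_cons_self ..))]
      rw [ih (by simp) (fun x hx => hdf x (List.mem_cons_of_mem _ hx))]

-- String-level facts
theorem strSplitDot_ne_nil (s : String) : strSplitDot s ≠ [] := by
  unfold strSplitDot
  rw [splitOn_eq_fsplit]
  simp [fsplit_ne_nil]

theorem strSplitDot_dotfree (s : String) : ∀ g ∈ strSplitDot s, '.' ∉ g.toList := by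
  unfold strSplitDot
  rw [splitOn_eq_fsplit]
  intro g hg
  rcases List.mem_map.mp hg with ⟨cs, hcs, rfl⟩
  rw [String.toList_ofList]
  exact mem_fsplit_dotfree s.toList cs hcs

theorem join_strSplitDot (s : String) : PySem.Str.join "." (strSplitDot s) = s := by
  unfold PySem.Str.join strSplitDot
  rw [splitOn_eq_fsplit]
  have : List.map String.toList (List.map String.ofList (fsplit s.toList)) = fsplit s.toList := by
    simp [List.map_map, Function.comp_def, String.toList_ofList]
  rw [this]
  have hsep : (".".toList : List Char) = ['.'] := rfl
  rw [hsep, join_fsplit, String.ofList_toList]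

theorem strSplitDot_join (gs : List String) (hne : gs ≠ [])
    (hdf : ∀ g ∈ gs, '.' ∉ g.toList) : strSplitDot (PySem.Str.join "." gs) = gs := by
  unfold strSplitDot PySem.Str.join
  rw [String.toList_ofList]
  have hsep : (".".toList : List Char) = ['.'] := rfl
  rw [hsep, splitOn_eq_fsplit]
  rw [fsplit_join (gs.map String.toList) (by simpa using hne)
    (by intro g hg; rcases List.mem_map.mp hg with ⟨x, hx, rfl⟩; exact hdf x hx)]
  simp [List.map_map, Function.comp_def, String.ofList_toList]

-- the main correspondence: A on (join gs) equals B's loop on gs, for split-shaped gs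
theorem trim_right_loop (n : Nat) :
    ∀ (cons : List Int) (gs : List String), cons.length ≤ n → gs ≠ [] →
      (∀ g ∈ gs, '.' ∉ g.toList) →
      trim_right (PySem.Str.join "." gs) cons =
        (PySem.Str.join "." (trimAltLoop gs cons).1, (trimAltLoop gs cons).2) := by
  induction n with
  | zero =>
    intro cons gs hlen hne hdf
    have : cons = [] := List.eq_nil_of_length_eq_zero (Nat.le_zero.mp hlen)
    subst this
    rw [trim_right, trimAltLoop]
    simp
  | succ m ih =>
    intro cons gs hlen hne hdf
    by_cases hc : cons = []
    · subst hc
      rw [trim_right, trimAltLoop]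
      simp
    · rw [trim_right, trimAltLoop]
      rw [dif_neg hc]
      simp only [strSplitDot_join gs hne hdf]
      by_cases hcond : PySem.Str.len (PySem.List.pyGetD gs (-1) "") ≤ PySem.List.pyGetD cons (-1) 0
      · rw [if_pos hcond, dif_pos ⟨hc, hcond⟩]
        set gs' : List String :=
          (let g := PySem.List.slice gs none (some (-1)); if g = [] then [""] else g) with hgs'
        have hjoin : PySem.Str.join "." (PySem.List.slice gs none (some (-1))) =
            PySem.Str.join "." gs' := by
          rw [hgs']
          simp only [PySem.List.slice_to_neg_one]
          by_cases hd : gs.dropLast = []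
          · rw [hd]; simp only [if_true]
            decide
          · rw [if_neg hd]
        rw [hjoin]
        have hne' : gs' ≠ [] := by
          rw [hgs']; simp only [PySem.List.slice_to_neg_one]
          by_cases hd : gs.dropLast = [] <;> simp [hd]
        have hdf' : ∀ g ∈ gs', '.' ∉ g.toList := by
          rw [hgs']; simp only [PySem.List.slice_to_neg_one]
          by_cases hd : gs.dropLast = []
          · rw [hd]; simp only [if_true]
            intro g hg; simp at hg; subst hg; simp
          · rw [if_neg hd]
            intro g hg
            exact hdf g (List.dropLast_subset _ hg)
        have hlen' : (PySem.List.slice cons none (some (-1))).length ≤ m := by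
          rw [PySem.List.slice_to_neg_one]
          have : cons.length ≠ 0 := fun h0 => hc (List.eq_nil_of_length_eq_zero h0)
          simp [List.length_dropLast]; omega
        exact ih (PySem.List.slice cons none (some (-1))) gs' hlen' hne' hdf'
      · rw [if_neg hcond, dif_neg (fun h => hcond h.2)]

-- ===== VERDICT (by name: the statement is the Claim_ definition above) =====
theorem trim_right_spec : Claim_equal_trim_right := by
  intro record constraints _
  unfold Spec_trim_right trim_right_alt
  have h := trim_right_loop constraints.length constraints (strSplitDot record)
    (le_refl _) (strSplitDot_ne_nil record) (strSplitDot_dotfree record)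
  rw [join_strSplitDot record] at h
  exact h
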